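-- pv_equiv track=rewrite | github.com/WeAreTheArtMakers/AIDetector | backend/forensic/text_forensics.py | _has_unusual_casing
-- ===== SOURCE A (Python) =====
-- def _has_unusual_casing(text: str) -> bool:
--     """Check for unusual character casing patterns."""
--     if len(text) < 3:
--         return False
--
--     # Check for random caps in middle of word
--     # e.g., "hElLo" or "KOEMO" patterns
--     if text.isalpha():
--         upper_positions = [i for i, c in enumerate(text) if c.isupper()]
--         lower_positions = [i for i, c in enumerate(text) if c.islower()]
--
--         # Alternating case is suspicious
--         if len(upper_positions) >= 2 and len(lower_positions) >= 2:
--             # Check if they alternate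
--             all_positions = sorted(upper_positions + lower_positions)
--             alternating = True
--             for i in range(len(all_positions) - 1):
--                 if (all_positions[i] in upper_positions) == (all_positions[i+1] in upper_positions):
--                     alternating = False
--                     break
--             if alternating and len(text) >= 4:
--                 return True
--
--     return False
-- ===== SOURCE B (Python) =====
-- def _has_unusual_casing(text: str) -> bool:
--     """Check for unusual character casing patterns."""
--     if len(text) < 3 or not text.isalpha():
--         return False
--     count_upper = 0
--     count_lower = 0
--     prev = None          # case of the previous cased character
--     alternating = True
--     for c in text:
--         if c.isupper():
--             cur = True
--             count_upper += 1
--         elif c.islower():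
--             cur = False
--             count_lower += 1
--         else:
--             continue     # caseless alphabetic character: ignored
--         if prev is not None and prev == cur:
--             alternating = False
--         prev = cur
--     return count_upper >= 2 and count_lower >= 2 and alternating
-- ===== Notes on version B (the rewrite author's own statement) =====
-- stated objective: simpler
-- what changed: A builds upper/lower position lists, sorts their concatenation and scans it by index with membership tests in the position list; B makes one pass over the characters keeping two counters, the previous character's case and an alternating flag.
import Mathlib
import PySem

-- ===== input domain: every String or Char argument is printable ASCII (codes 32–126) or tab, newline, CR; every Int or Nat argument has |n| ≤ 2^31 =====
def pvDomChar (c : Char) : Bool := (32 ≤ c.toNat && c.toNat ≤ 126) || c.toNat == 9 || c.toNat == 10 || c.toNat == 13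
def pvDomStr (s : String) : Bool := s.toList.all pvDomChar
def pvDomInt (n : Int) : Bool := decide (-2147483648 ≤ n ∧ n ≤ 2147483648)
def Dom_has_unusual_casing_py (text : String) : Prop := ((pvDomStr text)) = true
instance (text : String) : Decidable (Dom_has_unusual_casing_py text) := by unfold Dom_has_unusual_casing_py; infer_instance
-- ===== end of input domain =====

-- B replaces A's position lists + sort + indexed scan by one left-to-right pass keeping
-- two counters and an alternating flag (objective: simpler; same return value everywhere).

-- ===== PORT A =====
-- 'for i in range(len(all_positions)-1): if (all[i] in up) == (all[i+1] in up): alternating = False; break'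
def pyAltLoop (allPos up : List Int) : List Int → Bool
  | [] => true
  | i :: rest =>
      if up.contains (PySem.List.pyGetD allPos i 0) == up.contains (PySem.List.pyGetD allPos (i + 1) 0)
      then false
      else pyAltLoop allPos up rest

def has_unusual_casing_py (text : String) : Bool :=
  let cs := text.toList
  if cs.length < 3 then false
  else if PySem.Chars.strIsalpha cs then
    let up := ((PySem.List.enumerate cs).filter (fun p => PySem.Chars.isupper p.2)).map (fun p => p.1)
    let lo := ((PySem.List.enumerate cs).filter (fun p => PySem.Chars.islower p.2)).map (fun p => p.1)
    if 2 ≤ up.length ∧ 2 ≤ lo.length then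
      let allPos := PySem.List.sorted (up ++ lo) (fun x => x)
      let alternating := pyAltLoop allPos up (PySem.List.pyRange 0 ((allPos.length : Int) - 1))
      if alternating && decide (4 ≤ cs.length) then true else false
    else false
  else false

-- ===== PORT B =====
-- single pass: counts of upper/lower, case of previous cased char, alternating flag
def bLoop : List Char → Int → Int → Option Bool → Bool → Int × Int × Bool
  | [], cu, cl, _, alt => (cu, cl, alt)
  | c :: rest, cu, cl, prev, alt =>
      if PySem.Chars.isupper c then
        bLoop rest (cu + 1) cl (some true) (if prev == some true then false else alt)
      else if PySem.Chars.islower c then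
        bLoop rest cu (cl + 1) (some false) (if prev == some false then false else alt)
      else
        bLoop rest cu cl prev alt

def has_unusual_casing_py_alt (text : String) : Bool :=
  let cs := text.toList
  if cs.length < 3 || !PySem.Chars.strIsalpha cs then false
  else
    let r := bLoop cs 0 0 none true
    decide (2 ≤ r.1) && decide (2 ≤ r.2.1) && r.2.2

-- ===== PRECONDITION & SPEC =====
def Spec_has_unusual_casing_py (text : String) (out : Bool) : Prop := out = has_unusual_casing_py_alt text
instance (text : String) (out : Bool) : Decidable (Spec_has_unusual_casing_py text out) := by unfold Spec_has_unusual_casing_py; infer_instance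

-- ===== CLAIM (what is proved, stated in full; the proofs are below) =====
def Claim_equal_has_unusual_casing_py : Prop := ∀ (text : String), Dom_has_unusual_casing_py text → Spec_has_unusual_casing_py text (has_unusual_casing_py text)

-- ===== LEMMAS AND PROOFS =====

-- adjacent-distinct check on the sequence of cases: the common reference both loops compute
def adjAll : List Bool → Bool
  | [] => true
  | [_] => true
  | a :: b :: rest => (a != b) && adjAll (b :: rest)

theorem upper_not_lower (c : Char) (h : PySem.Chars.isupper c = true) :
    PySem.Chars.islower c = false := by
  simp only [PySem.Chars.isupper, Bool.and_eq_true, decide_eq_true_eq] at h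
  simp only [PySem.Chars.islower, Bool.and_eq_false_iff, decide_eq_false_iff_not]
  left
  intro hle
  exact absurd (le_trans hle h.2) (by decide)

theorem adjAll_iff_getElem (bs : List Bool) :
    adjAll bs = true ↔ ∀ (k : Nat) (h : k + 1 < bs.length), bs[k] ≠ bs[k + 1] := by
  induction bs with
  | nil => simp [adjAll]
  | cons a t ih =>
    cases t with
    | nil => simp [adjAll]
    | cons b r =>
      rw [show adjAll (a :: b :: r) = ((a != b) && adjAll (b :: r)) from rfl]
      rw [Bool.and_eq_true, ih]
      constructor
      · rintro ⟨hab, hrest⟩ k hk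
        match k with
        | 0 => simpa using bne_iff_ne.mp hab
        | k + 1 =>
          have := hrest k (by simpa using hk)
          simpa using this
      · intro h
        refine ⟨bne_iff_ne.mpr (by simpa using h 0 (by simp)), ?_⟩
        intro k hk
        have := h (k + 1) (by simpa using hk)
        simpa using this

theorem pyAltLoop_eq_not_any (allPos up : List Int) (r : List Int) :
    pyAltLoop allPos up r =
      !(r.any (fun i => up.contains (PySem.List.pyGetD allPos i 0) ==
                        up.contains (PySem.List.pyGetD allPos (i + 1) 0))) := by
  induction r with
  | nil => simp [pyAltLoop]
  | cons i rest ih =>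
    rw [pyAltLoop]
    cases h : (up.contains (PySem.List.pyGetD allPos i 0) ==
        up.contains (PySem.List.pyGetD allPos (i + 1) 0)) with
    | true => simp at h ⊢; tauto
    | false => simp [ih] at h ⊢; tauto

theorem getD_pyRange_zero (n : Nat) (i : Int) (h0 : 0 ≤ i) (h : i < (n : Int)) :
    PySem.List.pyGetD (PySem.List.pyRange 0 (n : Int)) i 0 = i := by
  rw [PySem.List.pyGetD_of_nonneg _ _ h0]
  have hlen : i.toNat < (PySem.List.pyRange 0 (n : Int)).length := by
    rw [PySem.List.length_pyRange_one]; omega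
  rw [List.getD_eq_getElem _ _ hlen, PySem.List.getElem_pyRange_one]
  omega

theorem len_filter_enum (q : Char → Bool) (cs : List Char) (s : Int) :
    (((PySem.List.enumerate cs s).filter (fun p => q p.2)).map (fun p => p.1)).length
      = cs.countP q := by
  induction cs generalizing s with
  | nil => simp [PySem.List.enumerate]
  | cons c rest ih =>
    rw [PySem.List.enumerate_cons, List.filter_cons]
    by_cases hc : q c
    · simp [hc, ih]
    · simp only [Bool.not_eq_true] at hc
      simp [hc, ih]

theorem mem_filter_enum (q : Char → Bool) (cs : List Char) (k : Nat) (hk : k < cs.length) :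
    ((k : Int) ∈ ((PySem.List.enumerate cs).filter (fun p => q p.2)).map
        (fun p : Int × Char => p.1)) ↔ q (cs[k]'hk) = true := by
  simp only [List.mem_map, List.mem_filter, PySem.List.mem_enumerate_iff]
  constructor
  · rintro ⟨p, ⟨⟨j, hj, rfl⟩, hq⟩, hfst⟩
    simp only [zero_add] at hfst hq
    have : j = k := by exact_mod_cast hfst
    subst this
    exact hq
  · intro hq
    exact ⟨((k : Int), cs[k]'hk), ⟨⟨k, hk, by simp⟩, hq⟩, rfl⟩

theorem altA_iff (cs : List Char) (up : List Int)
    (hup : ∀ (k : Nat) (hk : k < cs.length),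
      ((k : Int) ∈ up ↔ PySem.Chars.isupper (cs[k]'hk) = true)) :
    pyAltLoop (PySem.List.pyRange 0 (cs.length : Int)) up
        (PySem.List.pyRange 0 ((cs.length : Int) - 1)) = true ↔
      ∀ (k : Nat) (h : k + 1 < cs.length),
        PySem.Chars.isupper (cs[k]'(by omega)) ≠ PySem.Chars.isupper (cs[k + 1]'h) := by
  have hcontains : ∀ (k : Nat) (hk : k < cs.length),
      up.contains (k : Int) = PySem.Chars.isupper (cs[k]'hk) := by
    intro k hk
    exact Bool.coe_iff_coe.mp (List.contains_iff_mem.trans (hup k hk))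
  have hcond : ∀ (k : Nat) (hk : k + 1 < cs.length),
      (up.contains (PySem.List.pyGetD (PySem.List.pyRange 0 (cs.length : Int)) (k : Int) 0) ==
        up.contains (PySem.List.pyGetD (PySem.List.pyRange 0 (cs.length : Int)) ((k : Int) + 1) 0))
      = (PySem.Chars.isupper (cs[k]'(by omega)) == PySem.Chars.isupper (cs[k + 1]'hk)) := by
    intro k hk
    rw [getD_pyRange_zero cs.length (k : Int) (by omega) (by exact_mod_cast Nat.lt_of_succ_lt hk)]
    rw [getD_pyRange_zero cs.length ((k : Int) + 1) (by omega) (by exact_mod_cast hk)]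
    rw [hcontains k (by omega)]
    rw [show ((k : Int) + 1) = ((k + 1 : Nat) : Int) by push_cast; ring]
    rw [hcontains (k + 1) hk]
  rw [pyAltLoop_eq_not_any]
  rw [Bool.not_eq_true']
  rw [List.any_eq_false]
  constructor
  · intro h k hk
    have hmem : (k : Int) ∈ PySem.List.pyRange 0 ((cs.length : Int) - 1) := by
      rw [PySem.List.mem_pyRange_one]; omega
    have := h _ hmem
    rw [hcond k hk] at this
    simpa using this
  · intro h i hi
    rw [PySem.List.mem_pyRange_one] at hi
    obtain ⟨h0, hlt⟩ := hi
    have hk : i.toNat + 1 < cs.length := by omega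
    have hi' : i = ((i.toNat : Nat) : Int) := by omega
    rw [hi', hcond i.toNat hk]
    simpa using h i.toNat hk

theorem bLoop_some (cs : List Char) (hAll : ∀ c ∈ cs, PySem.Chars.isalpha c = true)
    (cu cl : Int) (b : Bool) (alt : Bool) :
    bLoop cs cu cl (some b) alt =
      (cu + cs.countP PySem.Chars.isupper, cl + cs.countP PySem.Chars.islower,
        alt && adjAll (b :: cs.map PySem.Chars.isupper)) := by
  induction cs generalizing cu cl b alt with
  | nil => simp [bLoop, adjAll]
  | cons c rest ih =>
    have hAlpha : PySem.Chars.isupper c || PySem.Chars.islower c := by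
      have := hAll c (List.mem_cons_self ..)
      simpa [PySem.Chars.isalpha] using this
    have hrest : ∀ c' ∈ rest, PySem.Chars.isalpha c' = true :=
      fun c' hc' => hAll c' (List.mem_cons_of_mem _ hc')
    rw [bLoop]
    by_cases hu : PySem.Chars.isupper c
    · rw [if_pos hu, ih hrest]
      have hl := upper_not_lower c hu
      rw [List.map_cons, hu]
      rw [show adjAll (b :: true :: rest.map PySem.Chars.isupper)
            = ((b != true) && adjAll (true :: rest.map PySem.Chars.isupper)) from rfl]
      simp only [List.countP_cons, hu, hl]
      refine congrArg₂ _ (by push_cast; ring) (congrArg₂ _ (by push_cast; ring) ?_)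
      cases b <;> simp
    · have hu' : PySem.Chars.isupper c = false := by simpa using hu
      have hlo : PySem.Chars.islower c = true := by
        rcases Bool.or_eq_true_iff.mp hAlpha with h | h
        · exact absurd h hu
        · exact h
      rw [if_neg hu, if_pos hlo, ih hrest]
      rw [List.map_cons, hu']
      rw [show adjAll (b :: false :: rest.map PySem.Chars.isupper)
            = ((b != false) && adjAll (false :: rest.map PySem.Chars.isupper)) from rfl]
      simp only [List.countP_cons, hu', hlo]
      refine congrArg₂ _ (by push_cast; ring) (congrArg₂ _ (by push_cast; ring) ?_)
      cases b <;> simp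

theorem bLoop_none (cs : List Char) (hAll : ∀ c ∈ cs, PySem.Chars.isalpha c = true)
    (cu cl : Int) (alt : Bool) :
    bLoop cs cu cl none alt =
      (cu + cs.countP PySem.Chars.isupper, cl + cs.countP PySem.Chars.islower,
        alt && adjAll (cs.map PySem.Chars.isupper)) := by
  cases cs with
  | nil => simp [bLoop, adjAll]
  | cons c rest =>
    have hAlpha : PySem.Chars.isupper c || PySem.Chars.islower c := by
      have := hAll c (List.mem_cons_self ..)
      simpa [PySem.Chars.isalpha] using this
    have hrest : ∀ c' ∈ rest, PySem.Chars.isalpha c' = true :=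
      fun c' hc' => hAll c' (List.mem_cons_of_mem _ hc')
    rw [bLoop]
    by_cases hu : PySem.Chars.isupper c
    · rw [if_pos hu]
      rw [show ((none : Option Bool) == some true) = false from rfl]
      rw [if_neg (by simp)]
      rw [bLoop_some rest hrest]
      have hl := upper_not_lower c hu
      rw [List.map_cons, hu]
      simp only [List.countP_cons, hu, hl]
      refine congrArg₂ _ (by push_cast; ring) (congrArg₂ _ (by push_cast; ring) rfl)
    · have hu' : PySem.Chars.isupper c = false := by simpa using hu
      have hlo : PySem.Chars.islower c = true := by
        rcases Bool.or_eq_true_iff.mp hAlpha with h | h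
        · exact absurd h hu
        · exact h
      rw [if_neg hu, if_pos hlo]
      rw [if_neg (by simp)]
      rw [bLoop_some rest hrest]
      rw [List.map_cons, hu']
      simp only [List.countP_cons, hu', hlo]
      refine congrArg₂ _ (by push_cast; ring) (congrArg₂ _ (by push_cast; ring) rfl)

-- ===== VERDICT (by name: the statement is the Claim_ definition above) =====
theorem has_unusual_casing_py_spec : Claim_equal_has_unusual_casing_py := by
  intro text _dom
  unfold Spec_has_unusual_casing_py has_unusual_casing_py has_unusual_casing_py_alt
  by_cases h3 : text.toList.length < 3
  · have h3' : text.length < 3 := by simpa using h3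
    simp [h3']
  · by_cases halpha : PySem.Chars.strIsalpha text.toList
    · have hAll : ∀ c ∈ text.toList, PySem.Chars.isalpha c = true := by
        have := halpha
        unfold PySem.Chars.strIsalpha at this
        rw [Bool.and_eq_true, List.all_eq_true] at this
        exact fun c hc => this.2 c hc
      rw [if_neg h3, if_pos halpha]
      simp only [bLoop_none text.toList hAll]
      set up := ((PySem.List.enumerate text.toList).filter
        (fun p => PySem.Chars.isupper p.2)).map (fun p => p.1) with hup_def
      set lo := ((PySem.List.enumerate text.toList).filter
        (fun p => PySem.Chars.islower p.2)).map (fun p => p.1) with hlo_def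
      have hU : up.length = text.toList.countP PySem.Chars.isupper := len_filter_enum _ _ _
      have hL : lo.length = text.toList.countP PySem.Chars.islower := len_filter_enum _ _ _
      have hlo_eq : (PySem.List.enumerate text.toList).filter (fun p => PySem.Chars.islower p.2)
          = (PySem.List.enumerate text.toList).filter (fun p => !PySem.Chars.isupper p.2) := by
        apply List.filter_congr
        intro p hp
        have hpc : p.2 ∈ text.toList := by
          rw [PySem.List.mem_enumerate_iff] at hp
          obtain ⟨k, hk, rfl⟩ := hp
          exact List.getElem_mem hk
        have halpha' := hAll p.2 hpc
        by_cases hu : PySem.Chars.isupper p.2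
        · rw [upper_not_lower _ hu, hu]; rfl
        · have hu' : PySem.Chars.isupper p.2 = false := by simpa using hu
          have : PySem.Chars.islower p.2 = true := by
            simp only [PySem.Chars.isalpha, Bool.or_eq_true_iff] at halpha'
            rcases halpha' with h | h
            · exact absurd h hu
            · exact h
          rw [this, hu']; rfl
      have hperm : (PySem.List.pyRange 0 (text.toList.length : Int)).Perm (up ++ lo) := by
        rw [hup_def, hlo_def, hlo_eq, ← List.map_append]
        have h1 := (List.filter_append_perm (fun p : Int × Char => PySem.Chars.isupper p.2)
          (PySem.List.enumerate text.toList)).map (fun p : Int × Char => p.1)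
        rw [PySem.List.map_fst_enumerate, zero_add] at h1
        exact h1.symm
      have hsorted : PySem.List.sorted (up ++ lo) (fun x => x)
          = PySem.List.pyRange 0 (text.toList.length : Int) :=
        PySem.List.sorted_eq_of_perm_of_pairwise_lt _ _ _ hperm
          (PySem.List.pairwise_lt_pyRange_one 0 (text.toList.length : Int))
      have hlen_all : (PySem.List.sorted (up ++ lo) (fun x => x)).length
          = text.toList.length := by
        rw [hsorted, PySem.List.length_pyRange_one]; omega
      have hsum : up.length + lo.length = text.toList.length := by
        have := hperm.length_eq
        rw [PySem.List.length_pyRange_one, List.length_append] at this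
        omega
      rw [hlen_all, hsorted]
      have hguard : (decide (text.toList.length < 3) || !PySem.Chars.strIsalpha text.toList)
          = false := by
        simp [halpha]
        exact Nat.le_of_not_lt (by simpa using h3)
      rw [hguard, if_neg (show ¬(false = true) by simp)]
      by_cases hcnt : 2 ≤ up.length ∧ 2 ≤ lo.length
      · rw [if_pos hcnt]
        have h4 : 4 ≤ text.toList.length := by omega
        have hmem : ∀ (k : Nat) (hk : k < text.toList.length),
            ((k : Int) ∈ up ↔ PySem.Chars.isupper (text.toList[k]'hk) = true) := by
          intro k hk
          rw [hup_def]
          exact mem_filter_enum _ text.toList k hk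
        have hAeqB : pyAltLoop (PySem.List.pyRange 0 (text.toList.length : Int)) up
            (PySem.List.pyRange 0 ((text.toList.length : Int) - 1))
            = adjAll (text.toList.map PySem.Chars.isupper) := by
          apply Bool.coe_iff_coe.mp
          rw [altA_iff text.toList up hmem, adjAll_iff_getElem]
          constructor
          · intro h k hk
            have hk' : k + 1 < text.toList.length := by simpa using hk
            have := h k hk'
            simpa using this
          · intro h k hk
            have := h k (by simpa using hk)
            simpa using this
        rw [hAeqB, decide_eq_true h4]
        have hU2 : 2 ≤ text.toList.countP PySem.Chars.isupper := by omega
        have hL2 : 2 ≤ text.toList.countP PySem.Chars.islower := by omega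
        simp [hU2, hL2]
      · rw [if_neg hcnt]
        rw [hU, hL] at hcnt
        have hor : ¬(2 ≤ text.toList.countP PySem.Chars.isupper)
            ∨ ¬(2 ≤ text.toList.countP PySem.Chars.islower) := by omega
        rcases hor with h | h
        · simp
          intro h1 _
          exact absurd h1 h
        · simp
          intro _ h2
          exact absurd h2 h
    · simp [halpha]
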